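-- pv_equiv track=rewrite | github.com/greatscottgadgets/hackrf | firmware/fpga/dsp/mcm.py | make_odd
-- ===== SOURCE A (Python) =====
-- def make_odd(n):
--     """Convert number to odd fundamental by right-shifting. Returns (odd_part, shift_amount)"""
--     if n == 0:
--         return 0, 0
--
--     shift = 0
--     while n % 2 == 0:
--         n = n >> 1
--         shift += 1
--
--     return n, shift
-- ===== SOURCE B (Python) =====
-- def make_odd(n):
--     """Convert number to odd fundamental by right-shifting. Returns (odd_part, shift_amount)"""
--     if n == 0:
--         return 0, 0
--     shift = (n & -n).bit_length() - 1
--     return n >> shift, shift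
-- ===== Notes on version B (the rewrite author's own statement) =====
-- stated objective: idiomatic
-- what changed: The repeated-division loop is replaced by a closed-form bit trick: n & -n isolates the lowest set bit and its bit_length gives the shift directly, then one right shift yields the odd part.
import Mathlib
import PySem

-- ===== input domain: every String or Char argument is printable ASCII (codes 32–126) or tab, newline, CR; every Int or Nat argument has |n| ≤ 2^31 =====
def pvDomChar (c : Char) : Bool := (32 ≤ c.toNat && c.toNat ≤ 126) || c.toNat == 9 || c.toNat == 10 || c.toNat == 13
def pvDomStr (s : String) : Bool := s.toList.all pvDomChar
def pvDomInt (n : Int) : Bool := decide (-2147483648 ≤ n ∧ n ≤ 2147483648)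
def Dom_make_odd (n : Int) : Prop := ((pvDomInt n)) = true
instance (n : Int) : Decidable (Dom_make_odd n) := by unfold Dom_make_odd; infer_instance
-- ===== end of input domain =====

-- B replaces A's repeated-division loop by the closed-form bit trick (n & -n).bit_length() - 1
-- for the shift followed by a single right shift (idiomatic, no loop).

-- ===== PORT A =====
-- termination fact for the while loop, cited by makeOddLoop's decreasing_by
theorem pvHalfLt (n : Int) (h0 : n ≠ 0) (he : n % 2 = 0) : (n >>> (1:Nat)).natAbs < n.natAbs := by
  obtain ⟨m, hm⟩ : (2:Int) ∣ n := Int.dvd_of_emod_eq_zero he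
  subst hm
  cases m with
  | ofNat k =>
      have hk : k ≠ 0 := by rintro rfl; simp at h0
      have h2 : (2:Int) * Int.ofNat k = Int.ofNat (2*k) := by simp
      rw [h2]
      show (Int.ofNat ((2*k) >>> 1)).natAbs < (Int.ofNat (2*k)).natAbs
      show (2*k) >>> 1 < 2*k
      simp only [Nat.shiftRight_succ, Nat.shiftRight_zero]
      omega
  | negSucc k =>
      have h2 : (2:Int) * Int.negSucc k = Int.negSucc (2*k+1) := by
        rw [Int.negSucc_eq, Int.negSucc_eq]; push_cast; ring
      rw [h2]
      show (Int.negSucc ((2*k+1) >>> 1)).natAbs < (Int.negSucc (2*k+1)).natAbs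
      show (2*k+1) >>> 1 + 1 < (2*k+1) + 1
      simp only [Nat.shiftRight_succ, Nat.shiftRight_zero]
      omega

-- the 'while n % 2 == 0' loop of A; the 'n ≠ 0' conjunct is a totality guard only
-- (A only enters the loop with n ≠ 0, where the guard changes nothing)
def makeOddLoop (n : Int) (shift : Int) : Int × Int :=
  if h : n ≠ 0 ∧ n % 2 = 0 then
    makeOddLoop (n >>> (1:Nat)) (shift + 1)
  else
    (n, shift)
termination_by n.natAbs
decreasing_by exact pvHalfLt n h.1 h.2

def make_odd (n : Int) : Int × Int :=
  if n = 0 then (0, 0)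
  else makeOddLoop n 0

-- ===== PORT B =====
-- (n & -n).bit_length() - 1: n & -n is Int.land n (-n) (always positive here),
-- and bit_length of a nonnegative int is Nat.size of its magnitude (exact)
def make_odd_alt (n : Int) : Int × Int :=
  if n = 0 then (0, 0)
  else
    let shift : Nat := (Int.land n (-n)).natAbs.size - 1
    (n >>> shift, (shift : Int))

-- ===== PRECONDITION & SPEC =====
def Spec_make_odd (n : Int) (out : Int × Int) : Prop := out = make_odd_alt n
instance (n : Int) (out : Int × Int) : Decidable (Spec_make_odd n out) := by unfold Spec_make_odd; infer_instance

-- ===== CLAIM (what is proved, stated in full; the proofs are below) =====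
def Claim_equal_make_odd : Prop := ∀ (n : Int), Dom_make_odd n → Spec_make_odd n (make_odd n)

-- ===== LEMMAS AND PROOFS =====

-- n & -n in terms of Nat.ldiff of |n| and |n| - 1
lemma land_neg_self (n : Int) (h : n ≠ 0) :
    Int.land n (-n) = Int.ofNat (Nat.ldiff n.natAbs (n.natAbs - 1)) := by
  cases n with
  | ofNat k =>
      cases k with
      | zero => simp at h
      | succ j =>
          show Int.land (Int.ofNat (j+1)) (Int.negSucc j) = Int.ofNat (Nat.ldiff (j+1) j)
          simp [Int.land]
  | negSucc k =>
      show Int.land (Int.negSucc k) (Int.ofNat (k+1)) = Int.ofNat (Nat.ldiff (k+1) k)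
      simp [Int.land]

lemma ldiff_odd (j : Nat) : Nat.ldiff (2*j+1) (2*j) = 1 := by
  apply Nat.eq_of_testBit_eq
  intro i
  rw [Nat.testBit_ldiff]
  cases i with
  | zero =>
      simp only [Nat.testBit_zero]
      have h1 : (2*j+1) % 2 = 1 := by omega
      have h2 : (2*j) % 2 = 0 := by omega
      simp [h1, h2]
  | succ i =>
      have h1 : (2*j+1)/2 = j := by omega
      have h2 : (2*j)/2 = j := by omega
      have h3 : (1:Nat)/2 = 0 := by norm_num
      simp [Nat.testBit_succ, h1, h2, h3, Nat.zero_testBit]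

lemma ldiff_even (j : Nat) : Nat.ldiff (2*j+2) (2*j+1) = 2 * Nat.ldiff (j+1) j := by
  apply Nat.eq_of_testBit_eq
  intro i
  rw [Nat.testBit_ldiff]
  cases i with
  | zero =>
      simp only [Nat.testBit_zero]
      have h1 : (2*j+2) % 2 = 0 := by omega
      have h2 : (2 * Nat.ldiff (j+1) j) % 2 = 0 := by omega
      simp [h1, h2]
  | succ i =>
      have h1 : (2*j+2)/2 = j+1 := by omega
      have h2 : (2*j+1)/2 = j := by omega
      have h3 : (2 * Nat.ldiff (j+1) j)/2 = Nat.ldiff (j+1) j := by omega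
      simp [Nat.testBit_succ, h1, h2, h3, Nat.testBit_ldiff]

lemma ldiff_pow (k : Nat) : ∃ e, Nat.ldiff (k+1) k = 2^e := by
  induction k using Nat.strong_induction_on with
  | _ k ih =>
    rcases Nat.even_or_odd k with ⟨j, hj⟩ | ⟨j, hj⟩
    · refine ⟨0, ?_⟩
      have h2 : k = 2*j := by omega
      rw [h2]
      simpa using ldiff_odd j
    · obtain ⟨e, he⟩ := ih j (by omega)
      refine ⟨e + 1, ?_⟩
      have h1 : k = 2*j + 1 := by omega
      rw [h1, (by ring : 2*j+1+1 = 2*j+2), ldiff_even, he, pow_succ]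
      ring

lemma two_mul_shiftRight_one (m : Int) : ((2:Int) * m) >>> (1:Nat) = m := by
  cases m with
  | ofNat k =>
      have h2 : (2:Int) * Int.ofNat k = Int.ofNat (2*k) := by simp
      rw [h2]
      show Int.ofNat ((2*k) >>> 1) = Int.ofNat k
      congr 1
      simp only [Nat.shiftRight_succ, Nat.shiftRight_zero]
      omega
  | negSucc k =>
      have h2 : (2:Int) * Int.negSucc k = Int.negSucc (2*k+1) := by
        rw [Int.negSucc_eq, Int.negSucc_eq]; push_cast; ring
      rw [h2]
      show Int.negSucc ((2*k+1) >>> 1) = Int.negSucc k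
      congr 1
      simp only [Nat.shiftRight_succ, Nat.shiftRight_zero]
      omega

lemma odd_natAbs_of_not_even (n : Int) (h : ¬ n % 2 = 0) : ∃ j, n.natAbs = 2*j + 1 := by
  have : n.natAbs % 2 = 1 := by omega
  exact ⟨n.natAbs / 2, by omega⟩

-- main invariant: if the isolated low bit of n is 2^e, the loop shifts exactly e times
lemma loop_eq (a : Nat) : ∀ (n : Int), n.natAbs = a → n ≠ 0 →
    ∀ (e : Nat), Nat.ldiff n.natAbs (n.natAbs - 1) = 2^e →
    ∀ (s : Int), makeOddLoop n s = (n >>> e, s + (e : Int)) := by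
  induction a using Nat.strong_induction_on with
  | _ a ih =>
    intro n hna h0 e he s
    by_cases hev : n % 2 = 0
    · -- even step
      obtain ⟨m, hm⟩ : (2:Int) ∣ n := Int.dvd_of_emod_eq_zero hev
      have hm0 : m ≠ 0 := by rintro rfl; simp at hm; exact h0 hm
      have habs : n.natAbs = 2 * m.natAbs := by rw [hm, Int.natAbs_mul]; rfl
      obtain ⟨j, hj⟩ : ∃ j, m.natAbs = j + 1 :=
        ⟨m.natAbs - 1, by have := Int.natAbs_pos.mpr hm0; omega⟩
      have hld : Nat.ldiff n.natAbs (n.natAbs - 1) = 2 * Nat.ldiff (j+1) j := by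
        rw [habs, hj, (by ring : 2*(j+1) = 2*j+2), (by omega : (2*j+2) - 1 = 2*j+1)]
        exact ldiff_even j
      obtain ⟨e', he'⟩ : ∃ e', e = e' + 1 := by
        cases e with
        | zero => exfalso; rw [hld, pow_zero] at he; omega
        | succ e' => exact ⟨e', rfl⟩
      have hld' : Nat.ldiff m.natAbs (m.natAbs - 1) = 2^e' := by
        rw [hj, (by omega : j + 1 - 1 = j)]
        have : 2 * Nat.ldiff (j+1) j = 2 * 2^e' := by
          rw [← hld, he, he', pow_succ]; ring
        omega
      have hlt : m.natAbs < a := by rw [← hna, habs]; omega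
      have step : makeOddLoop n s = makeOddLoop m (s + 1) := by
        rw [makeOddLoop, dif_pos ⟨h0, hev⟩, hm, two_mul_shiftRight_one]
      rw [step, ih m.natAbs hlt m rfl hm0 e' hld' (s+1)]
      have hshift : n >>> e = m >>> e' := by
        rw [he', hm, (by omega : e' + 1 = 1 + e'), Int.shiftRight_add, two_mul_shiftRight_one]
      rw [hshift, he']
      refine Prod.ext rfl ?_
      push_cast; ring
    · -- odd: loop exits immediately, and e must be 0
      obtain ⟨j, hj⟩ := odd_natAbs_of_not_even n hev
      have h1 : Nat.ldiff n.natAbs (n.natAbs - 1) = 1 := by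
        rw [hj, (by omega : (2*j+1) - 1 = 2*j)]; exact ldiff_odd j
      have he0 : e = 0 := by
        rw [h1] at he
        cases e with
        | zero => rfl
        | succ e' => exfalso; rw [pow_succ] at he; have := Nat.one_le_two_pow (n := e'); omega
      rw [makeOddLoop, dif_neg (fun h => hev h.2), he0]
      simp

-- ===== VERDICT (by name: the statement is the Claim_ definition above) =====
theorem make_odd_spec : Claim_equal_make_odd := by
  intro n _
  unfold Spec_make_odd make_odd make_odd_alt
  by_cases h0 : n = 0
  · simp [h0]
  · simp only [h0, ite_false]
    obtain ⟨e, he⟩ := ldiff_pow (n.natAbs - 1)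
    have hpos : 1 ≤ n.natAbs := Int.natAbs_pos.mpr h0
    have he' : Nat.ldiff n.natAbs (n.natAbs - 1) = 2^e := by
      rw [(by omega : n.natAbs = (n.natAbs - 1) + 1)]
      simpa using he
    have hsize : (Int.land n (-n)).natAbs.size - 1 = e := by
      rw [land_neg_self n h0, he']
      simp [Nat.size_pow]
    rw [hsize, loop_eq n.natAbs n rfl h0 e he' 0]
    simp
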